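-- pv_equiv track=rewrite | github.com/ghost-she-ni/Financial-Intelligence-Assistant | src/preprocessing/chunking.py | compute_chunk_starts
-- ===== SOURCE A (Python) =====
-- def compute_chunk_starts(
--     total_units: int,
--     chunk_size: int,
--     overlap: int,
--     min_chunk_units: int = 100,
-- ) -> list[int]:
--     """Compute sliding-window start offsets for fixed-size chunk units."""
--     if total_units <= 0:
--         return []
--     if overlap >= chunk_size:
--         raise ValueError("overlap must be strictly smaller than chunk_size")
--     if total_units <= chunk_size:
--         return [0]
--
--     step = chunk_size - overlap
--     starts = [0]
--
--     while True:
--         next_start = starts[-1] + step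
--         if next_start >= total_units:
--             break
--         remaining_units = total_units - next_start
--         if remaining_units < min_chunk_units:
--             tail_start = max(0, total_units - chunk_size)
--             if tail_start > starts[-1]:
--                 starts.append(tail_start)
--             break
--         starts.append(next_start)
--     return starts
-- ===== SOURCE B (Python) =====
-- def compute_chunk_starts(
--     total_units: int,
--     chunk_size: int,
--     overlap: int,
--     min_chunk_units: int = 100,
-- ) -> list[int]:
--     """Compute sliding-window start offsets for fixed-size chunk units."""
--     if total_units <= 0:
--         return []
--     if overlap >= chunk_size:
--         raise ValueError("overlap must be strictly smaller than chunk_size")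
--     if total_units <= chunk_size:
--         return [0]
--
--     step = chunk_size - overlap
--     # Largest K with k*step < total_units and total_units - k*step >= min_chunk_units
--     # for every 1 <= k <= K (both conditions are monotone in k), clamped at 0.
--     K = max(0, min((total_units - 1) // step, (total_units - min_chunk_units) // step))
--     starts = [k * step for k in range(K + 1)]
--     last = K * step
--     # The loop stops with a tail chunk only when the first rejected offset still
--     # lies inside the text (rejected for a short remainder, not for overflow).
--     if (K + 1) * step < total_units:
--         tail_start = max(0, total_units - chunk_size)
--         if tail_start > last:
--             starts.append(tail_start)
--     return starts
-- ===== Notes on version B (the rewrite author's own statement) =====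
-- stated objective: alternative
-- what changed: Replaces the incremental append-until-break while loop by a closed-form computation of the last accepted index K via two floor divisions, building the starts with a single range construction and handling the tail chunk as a separate arithmetic step.
import Mathlib
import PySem

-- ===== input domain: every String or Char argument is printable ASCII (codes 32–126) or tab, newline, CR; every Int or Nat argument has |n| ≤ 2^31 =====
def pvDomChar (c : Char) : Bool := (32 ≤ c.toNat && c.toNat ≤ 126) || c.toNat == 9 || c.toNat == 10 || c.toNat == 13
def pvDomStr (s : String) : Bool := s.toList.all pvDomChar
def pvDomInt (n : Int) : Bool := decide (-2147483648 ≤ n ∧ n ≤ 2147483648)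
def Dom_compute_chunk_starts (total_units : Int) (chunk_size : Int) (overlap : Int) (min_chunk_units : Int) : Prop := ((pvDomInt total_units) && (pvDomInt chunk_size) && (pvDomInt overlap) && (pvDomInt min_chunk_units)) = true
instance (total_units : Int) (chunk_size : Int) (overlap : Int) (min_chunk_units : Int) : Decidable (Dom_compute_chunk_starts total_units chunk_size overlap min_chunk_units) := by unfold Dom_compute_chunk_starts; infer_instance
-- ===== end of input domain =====

-- B replaces A's append-until-break while loop by a closed-form index bound K and one
-- range construction plus a separate arithmetic tail step (alternative decomposition).

-- ===== PORT A =====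
-- the `while True` loop of A; `hstep` is termination evidence only (A's caller guarantees it)
def chunkLoopA (total step chunk minu : Int) (hstep : 0 < step) (last : Int) (acc : List Int) : List Int :=
  let next := last + step
  if total ≤ next then acc
  else if total - next < minu then
    let tail := max 0 (total - chunk)
    if last < tail then acc ++ [tail] else acc
  else chunkLoopA total step chunk minu hstep next (acc ++ [next])
termination_by (total - last).toNat
decreasing_by simp only [not_le] at *; omega

def compute_chunk_starts (total_units : Int) (chunk_size : Int) (overlap : Int) (min_chunk_units : Int) : List Int :=
  if total_units ≤ 0 then []
  else if h : chunk_size ≤ overlap then []   -- Python raises ValueError here; excluded by Pre_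
  else if total_units ≤ chunk_size then [0]
  else chunkLoopA total_units (chunk_size - overlap) chunk_size min_chunk_units (by omega) 0 [0]

-- ===== PORT B =====
def compute_chunk_starts_alt (total_units : Int) (chunk_size : Int) (overlap : Int) (min_chunk_units : Int) : List Int :=
  if total_units ≤ 0 then []
  else if chunk_size ≤ overlap then []       -- Python raises ValueError here; excluded by Pre_
  else if total_units ≤ chunk_size then [0]
  else
    let step := chunk_size - overlap
    let K := max 0 (min (PySem.Int.floordiv (total_units - 1) step)
                        (PySem.Int.floordiv (total_units - min_chunk_units) step))
    let starts := (PySem.List.pyRange 0 (K + 1) 1).map (fun k => k * step)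
    let last := K * step
    if (K + 1) * step < total_units then
      let tail_start := max 0 (total_units - chunk_size)
      if last < tail_start then starts ++ [tail_start] else starts
    else starts

-- ===== PRECONDITION & SPEC =====
-- Pre_ excludes exactly the inputs where A raises ValueError (overlap ≥ chunk_size with total_units > 0).
def Pre_compute_chunk_starts (total_units : Int) (chunk_size : Int) (overlap : Int) (min_chunk_units : Int) : Prop :=
  total_units ≤ 0 ∨ overlap < chunk_size
instance (total_units : Int) (chunk_size : Int) (overlap : Int) (min_chunk_units : Int) : Decidable (Pre_compute_chunk_starts total_units chunk_size overlap min_chunk_units) := by unfold Pre_compute_chunk_starts; infer_instance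
def pvWitness_compute_chunk_starts : Int × Int × Int × Int := (250, 100, 20, 50)

def Spec_compute_chunk_starts (total_units : Int) (chunk_size : Int) (overlap : Int) (min_chunk_units : Int) (out : List Int) : Prop := out = compute_chunk_starts_alt total_units chunk_size overlap min_chunk_units
instance (total_units : Int) (chunk_size : Int) (overlap : Int) (min_chunk_units : Int) (out : List Int) : Decidable (Spec_compute_chunk_starts total_units chunk_size overlap min_chunk_units out) := by unfold Spec_compute_chunk_starts; infer_instance

-- ===== CLAIM (what is proved, stated in full; the proofs are below) =====
def Claim_equal_compute_chunk_starts : Prop := ∀ (total_units : Int) (chunk_size : Int) (overlap : Int) (min_chunk_units : Int), Dom_compute_chunk_starts total_units chunk_size overlap min_chunk_units → Pre_compute_chunk_starts total_units chunk_size overlap min_chunk_units → Spec_compute_chunk_starts total_units chunk_size overlap min_chunk_units (compute_chunk_starts total_units chunk_size overlap min_chunk_units)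

-- ===== LEMMAS AND PROOFS =====

-- k ≤ min of the two floor quotients ↔ offset k*step is accepted by A's loop conditions
lemma le_K_iff (t m step k : Int) (hs : 0 < step) :
    k ≤ min (PySem.Int.floordiv (t - 1) step) (PySem.Int.floordiv (t - m) step)
      ↔ k * step ≤ t - 1 ∧ k * step ≤ t - m := by
  rw [le_min_iff, PySem.Int.le_floordiv_iff_mul_le hs, PySem.Int.le_floordiv_iff_mul_le hs]

-- the loop, started at offset j*step with 0 ≤ j ≤ K, appends the accepted offsets
-- (j+1)*step … K*step and then the tail chunk exactly when A's tail branch fires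
lemma chunkLoopA_eq (t c m step K : Int) (hs : 0 < step)
    (hK : K = max 0 (min (PySem.Int.floordiv (t - 1) step) (PySem.Int.floordiv (t - m) step))) :
    ∀ (n : Nat) (j last : Int) (acc : List Int), last = j * step → 0 ≤ j → j ≤ K → (K - j).toNat = n →
    chunkLoopA t step c m hs last acc
      = acc ++ (PySem.List.pyRange (j + 1) (K + 1) 1).map (fun k => k * step)
            ++ (if (K + 1) * step < t ∧ K * step < max 0 (t - c) then [max 0 (t - c)] else []) := by
  intro n
  induction n with
  | zero =>
    intro j last acc hlast hj0 hjK hn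
    subst hlast
    have hjeq : j = K := by omega
    rw [← hjeq]
    have hnot : ¬ (j + 1 ≤ min (PySem.Int.floordiv (t - 1) step) (PySem.Int.floordiv (t - m) step)) := by omega
    rw [le_K_iff t m step (j + 1) hs] at hnot
    rw [chunkLoopA]
    simp only [PySem.List.pyRange_one_eq_nil (by omega : j + 1 ≤ j + 1), List.map_nil, List.append_nil]
    by_cases h1 : t ≤ j * step + step
    · simp only [if_pos h1]
      have : ¬ ((j + 1) * step < t) := by nlinarith
      simp [this]
    · simp only [if_neg h1]
      have hlt : (j + 1) * step < t := by nlinarith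
      have h2 : t - (j * step + step) < m := by
        by_contra h2
        exact hnot ⟨by nlinarith, by nlinarith⟩
      simp only [if_pos h2, hlt, true_and]
      split <;> simp
  | succ n ih =>
    intro j last acc hlast hj0 hjK hn
    subst hlast
    have hjlt : j < K := by omega
    have hacc : j + 1 ≤ min (PySem.Int.floordiv (t - 1) step) (PySem.Int.floordiv (t - m) step) := by
      omega
    rw [le_K_iff t m step (j + 1) hs] at hacc
    rw [chunkLoopA]
    have h1 : ¬ (t ≤ j * step + step) := by nlinarith [hacc.1]
    have h2 : ¬ (t - (j * step + step) < m) := by nlinarith [hacc.2]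
    simp only [if_neg h1, if_neg h2]
    have hnext : j * step + step = (j + 1) * step := by ring
    rw [hnext, ih (j + 1) ((j + 1) * step) (acc ++ [(j + 1) * step]) rfl (by omega) (by omega) (by omega)]
    rw [PySem.List.pyRange_one_cons (by omega : j + 1 < K + 1)]
    simp [List.append_assoc]

-- the whole non-degenerate branch: A's loop from 0 equals B's range construction plus tail step
lemma main_branch (t c o m : Int) (hco : ¬ c ≤ o) :
    chunkLoopA t (c - o) c m (by omega) 0 [0]
      = (if (max 0 (min (PySem.Int.floordiv (t - 1) (c - o)) (PySem.Int.floordiv (t - m) (c - o))) + 1) * (c - o) < t then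
          if (max 0 (min (PySem.Int.floordiv (t - 1) (c - o)) (PySem.Int.floordiv (t - m) (c - o)))) * (c - o) < max 0 (t - c) then
            ((PySem.List.pyRange 0 ((max 0 (min (PySem.Int.floordiv (t - 1) (c - o)) (PySem.Int.floordiv (t - m) (c - o)))) + 1) 1).map (fun k => k * (c - o))) ++ [max 0 (t - c)]
          else ((PySem.List.pyRange 0 ((max 0 (min (PySem.Int.floordiv (t - 1) (c - o)) (PySem.Int.floordiv (t - m) (c - o)))) + 1) 1).map (fun k => k * (c - o)))
        else ((PySem.List.pyRange 0 ((max 0 (min (PySem.Int.floordiv (t - 1) (c - o)) (PySem.Int.floordiv (t - m) (c - o)))) + 1) 1).map (fun k => k * (c - o)))) := by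
  have hs : (0 : Int) < c - o := by omega
  set K := max 0 (min (PySem.Int.floordiv (t - 1) (c - o)) (PySem.Int.floordiv (t - m) (c - o))) with hK
  rw [chunkLoopA_eq t c m (c - o) K hs hK (K - 0).toNat 0 0 [0] (by ring) (by omega) (le_max_left 0 _) rfl]
  rw [PySem.List.pyRange_one_cons (by omega : (0:Int) < K + 1)]
  simp only [List.map_cons, zero_mul, List.cons_append]
  by_cases hA : (K + 1) * (c - o) < t
  · by_cases hB : K * (c - o) < max 0 (t - c)
    · simp [hA, hB]
    · simp [hA, hB]
  · simp [hA]

-- ===== VERDICT (by name: the statement is the Claim_ definition above) =====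
theorem compute_chunk_starts_spec : Claim_equal_compute_chunk_starts := by
  intro t c o m _hdom hpre
  unfold Spec_compute_chunk_starts compute_chunk_starts compute_chunk_starts_alt
  by_cases h0 : t ≤ 0
  · simp [h0]
  · have hco : ¬ (c ≤ o) := by rcases hpre with h | h <;> omega
    by_cases htc : t ≤ c
    · simp [h0, hco, htc]
    · simp only [if_neg h0, dif_neg hco, if_neg hco, if_neg htc]
      exact main_branch t c o m hco
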